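-- pv_equiv track=rewrite | github.com/ajfuto/futools | vigenere/vig.py | find_ngrams
-- ===== SOURCE A (Python) =====
-- MIN_NGRAM_LENGTH = 3
--
-- def find_ngrams(text):
--     ngrams = []
--     for i in range(0, len(text) - MIN_NGRAM_LENGTH):
--         for j in range(i+MIN_NGRAM_LENGTH, len(text) - MIN_NGRAM_LENGTH):
--             subs = ""
--             for k in range(0, len(text)-j):
--                 if text[i+k] != text[j+k]:
--                     break
--                 subs = subs + text[i+k]
--
--             if len(subs) >= MIN_NGRAM_LENGTH and subs not in ngrams:
--                 ngrams.append(subs)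
--
--     return ngrams
-- ===== SOURCE B (Python) =====
-- MIN_NGRAM_LENGTH = 3
--
-- def find_ngrams(text):
--     # Dynamic-programming LCP table (suffix-vs-suffix match lengths), filled
--     # right-to-left once, replaces A's inner character-scan; set-backed dedup.
--     n = len(text)
--     lcp = [[0] * (n + 1) for _ in range(n + 1)]
--     for i in range(n - 1, -1, -1):
--         for j in range(n - 1, -1, -1):
--             if text[i] == text[j]:
--                 lcp[i][j] = lcp[i + 1][j + 1] + 1
--     out = []
--     seen = set()
--     for i in range(0, n - MIN_NGRAM_LENGTH):
--         for j in range(i + MIN_NGRAM_LENGTH, n - MIN_NGRAM_LENGTH):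
--             L = lcp[i][j]
--             if L >= MIN_NGRAM_LENGTH:
--                 s = text[i:i + L]
--                 if s not in seen:
--                     seen.add(s)
--                     out.append(s)
--     return out
-- ===== Notes on version B (the rewrite author's own statement) =====
-- stated objective: faster
-- what changed: Replaces A's per-pair character-by-character rescan with a suffix-match-length DP table filled once right-to-left (lcp[i][j] = lcp[i+1][j+1]+1), so each pair is handled in O(1), and backs the ordered dedup with a set instead of scanning the output list.
import Mathlib
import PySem

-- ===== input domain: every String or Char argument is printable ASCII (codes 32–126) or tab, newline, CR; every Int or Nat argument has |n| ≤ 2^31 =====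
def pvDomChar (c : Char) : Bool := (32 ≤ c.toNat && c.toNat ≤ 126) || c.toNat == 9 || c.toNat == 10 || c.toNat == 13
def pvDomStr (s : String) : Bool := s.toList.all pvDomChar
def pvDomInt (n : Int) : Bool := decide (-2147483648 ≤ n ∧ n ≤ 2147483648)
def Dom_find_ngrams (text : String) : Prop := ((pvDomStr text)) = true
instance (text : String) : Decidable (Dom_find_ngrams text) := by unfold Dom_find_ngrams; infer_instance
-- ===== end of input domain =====

-- B replaces A's per-pair character rescan by a suffix-LCP DP table filled once
-- (O(n^2) instead of O(n^3)) and backs the ordered dedup with a set.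


-- ===== PORT A =====
-- inner 'for k in range(0, len(text)-j)' loop with its break; Python str built
-- char by char is modelled as a List Char wrapped by String.ofList (exact on chars).
-- The `| _, _ => subs` arm is unreachable (indices are always in range here).
def pvSubsA (cs : List Char) (i j : Int) : List Int → List Char → List Char
  | [], subs => subs
  | k :: ks, subs =>
    match PySem.List.pyGet? cs (i + k), PySem.List.pyGet? cs (j + k) with
    | some a, some b => if a ≠ b then subs else pvSubsA cs i j ks (subs ++ [a])
    | _, _ => subs

def find_ngrams (text : String) : List String :=
  let cs := text.toList
  let n : Int := cs.length
  (PySem.List.pyRange 0 (n - 3) 1).foldl (fun ngrams i =>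
    (PySem.List.pyRange (i + 3) (n - 3) 1).foldl (fun ngrams j =>
      let subs := String.ofList (pvSubsA cs i j (PySem.List.pyRange 0 (n - j) 1) [])
      if 3 ≤ PySem.Str.len subs ∧ subs ∉ ngrams then ngrams ++ [subs] else ngrams)
      ngrams) []

-- ===== PORT B =====
-- the DP table of Source B, built row by row from i = n down to 0:
-- pvRowB cs i is the row lcp[i] (length n+1), read from row i+1.
def pvRowB (cs : List Char) (i : Nat) : List Nat :=
  if h : i < cs.length then
    (List.range (cs.length + 1)).map (fun j =>
      if hj : j < cs.length then
        if cs[i] = cs[j] then (pvRowB cs (i + 1)).getD (j + 1) 0 + 1 else 0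
      else 0)
  else List.replicate (cs.length + 1) 0
termination_by cs.length - i

def find_ngrams_alt (text : String) : List String :=
  let cs := text.toList
  let n : Int := cs.length
  ((PySem.List.pyRange 0 (n - 3) 1).foldl (fun (st : List String × PySem.Set String) i =>
    (PySem.List.pyRange (i + 3) (n - 3) 1).foldl (fun st j =>
      let L : Nat := (pvRowB cs i.toNat).getD j.toNat 0
      if 3 ≤ L then
        let s := PySem.Str.slice text (some i) (some (i + (L : Int)))
        if PySem.Set.contains st.2 s then st else (st.1 ++ [s], PySem.Set.add st.2 s)
      else st) st) ([], PySem.Set.empty)).1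

-- ===== PRECONDITION & SPEC =====
def Spec_find_ngrams (text : String) (out : List String) : Prop := out = find_ngrams_alt text
instance (text : String) (out : List String) : Decidable (Spec_find_ngrams text out) := by unfold Spec_find_ngrams; infer_instance

-- ===== CLAIM (what is proved, stated in full; the proofs are below) =====
def Claim_equal_find_ngrams : Prop := ∀ (text : String), Dom_find_ngrams text → Spec_find_ngrams text (find_ngrams text)

-- ===== LEMMAS AND PROOFS =====

-- common prefix of two suffixes: the value both programs compute per pair
def pvCp : List Char → List Char → List Char
  | a :: as, b :: bs => if a = b then a :: pvCp as bs else []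
  | _, _ => []

theorem pvCp_nil_right (as : List Char) : pvCp as [] = [] := by
  cases as <;> rfl

theorem pvCp_eq_take (as bs : List Char) : pvCp as bs = as.take (pvCp as bs).length := by
  induction as generalizing bs with
  | nil => cases bs <;> rfl
  | cons a as ih =>
    cases bs with
    | nil => rfl
    | cons b bs =>
      by_cases h : a = b
      · simp only [pvCp, if_pos h, List.length_cons, List.take_succ_cons]
        exact congrArg (a :: ·) (ih bs)
      · simp [pvCp, h]

theorem pvGetD_map_range {α : Type} (f : Nat → α) (m j : Nat) (d : α) :
    ((List.range m).map f).getD j d = if j < m then f j else d := by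
  rcases Nat.lt_or_ge j m with h | h
  · rw [List.getD_eq_getElem _ _ (by simpa using h)]; simp [h]
  · rw [List.getD_eq_default _ _ (by simpa using h)]; simp [Nat.not_lt.mpr h]

theorem pvGetD_replicate {α : Type} (n j : Nat) (a d : α) :
    (List.replicate n a).getD j d = if j < n then a else d := by
  rcases Nat.lt_or_ge j n with h | h
  · rw [List.getD_eq_getElem _ _ (by simpa using h)]; simp [h]
  · rw [List.getD_eq_default _ _ (by simpa using h)]; simp [Nat.not_lt.mpr h]

theorem pvRowB_getD (cs : List Char) (i j : Nat) :
    (pvRowB cs i).getD j 0 = (pvCp (cs.drop i) (cs.drop j)).length := by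
  rw [pvRowB]
  by_cases h : i < cs.length
  · rw [dif_pos h, pvGetD_map_range]
    by_cases hj1 : j < cs.length + 1
    · rw [if_pos hj1]
      by_cases hj : j < cs.length
      · rw [dif_pos hj, List.drop_eq_getElem_cons h, List.drop_eq_getElem_cons hj]
        by_cases he : cs[i] = cs[j]
        · rw [if_pos he]
          simp only [pvCp, if_pos he, List.length_cons]
          rw [pvRowB_getD cs (i + 1) (j + 1)]
        · rw [if_neg he]
          simp [pvCp, he]
      · rw [dif_neg hj]
        rw [show List.drop j cs = ([] : List Char) from List.drop_eq_nil_of_le (by omega),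
            pvCp_nil_right]
        rfl
    · rw [if_neg hj1,
          show List.drop j cs = ([] : List Char) from List.drop_eq_nil_of_le (by omega),
          pvCp_nil_right]
      rfl
  · rw [dif_neg h, pvGetD_replicate, List.drop_eq_nil_of_le (by omega)]
    simp [pvCp]
termination_by cs.length - i

theorem pvSubsA_spec (cs : List Char) (i j k : Int) (acc : List Char)
    (hi : 0 ≤ i) (hij : i < j) (hk : 0 ≤ k) :
    pvSubsA cs i j (PySem.List.pyRange k ((cs.length : Int) - j) 1) acc
      = acc ++ pvCp (cs.drop (i + k).toNat) (cs.drop (j + k).toNat) := by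
  by_cases hlt : k < (cs.length : Int) - j
  · rw [PySem.List.pyRange_one_cons (by omega)]
    have hik : 0 ≤ i + k := by omega
    have hikl : i + k < (cs.length : Int) := by omega
    have hjk : 0 ≤ j + k := by omega
    have hjkl : j + k < (cs.length : Int) := by omega
    have hi' : (i + k).toNat < cs.length := by omega
    have hj' : (j + k).toNat < cs.length := by omega
    rw [show pvSubsA cs i j (k :: PySem.List.pyRange (k + 1) ((cs.length : Int) - j) 1) acc
        = (match PySem.List.pyGet? cs (i + k), PySem.List.pyGet? cs (j + k) with
           | some a, some b => if a ≠ b then acc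
               else pvSubsA cs i j (PySem.List.pyRange (k + 1) ((cs.length : Int) - j) 1) (acc ++ [a])
           | _, _ => acc) from rfl]
    rw [PySem.List.pyGet?_eq_some_getElem cs hik (by exact_mod_cast hikl),
        PySem.List.pyGet?_eq_some_getElem cs hjk (by exact_mod_cast hjkl)]
    simp only []
    rw [List.drop_eq_getElem_cons hi', List.drop_eq_getElem_cons hj']
    by_cases he : cs[(i + k).toNat] = cs[(j + k).toNat]
    · rw [if_neg (by simpa using he)]
      simp only [pvCp, if_pos he]
      rw [pvSubsA_spec cs i j (k + 1) (acc ++ [cs[(i + k).toNat]]) hi hij (by omega)]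
      rw [show (i + (k + 1)).toNat = (i + k).toNat + 1 by omega,
          show (j + (k + 1)).toNat = (j + k).toNat + 1 by omega]
      simp
    · rw [if_pos (by simpa using he)]
      simp [pvCp, he]
  · rw [PySem.List.pyRange_one_eq_nil (by omega)]
    rw [show pvSubsA cs i j [] acc = acc from rfl]
    rw [List.drop_eq_nil_of_le (show cs.length ≤ (j + k).toNat by omega), pvCp_nil_right]
    simp
termination_by ((cs.length : Int) - j - k).toNat
decreasing_by omega

-- the value both programs compute for the pair (i, j), and its length
theorem pvStep_eq (text : String) (i j : Int) (hi : 0 ≤ i) (hij : i < j) :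
    String.ofList (pvSubsA text.toList i j
        (PySem.List.pyRange 0 ((text.toList.length : Int) - j) 1) [])
      = PySem.Str.slice text (some i)
          (some (i + ((pvRowB text.toList i.toNat).getD j.toNat 0 : Int)))
    ∧ PySem.Str.len (String.ofList (pvSubsA text.toList i j
        (PySem.List.pyRange 0 ((text.toList.length : Int) - j) 1) []))
      = ((pvRowB text.toList i.toNat).getD j.toNat 0 : Int) := by
  have hsub := pvSubsA_spec text.toList i j 0 [] hi hij le_rfl
  rw [add_zero, add_zero, List.nil_append] at hsub
  have hrow : (pvRowB text.toList i.toNat).getD j.toNat 0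
      = (pvCp (text.toList.drop i.toNat) (text.toList.drop j.toNat)).length :=
    pvRowB_getD text.toList i.toNat j.toNat
  constructor
  · have htl : (PySem.Str.slice text (some i)
        (some (i + ((pvRowB text.toList i.toNat).getD j.toNat 0 : Int)))).toList
        = pvSubsA text.toList i j
            (PySem.List.pyRange 0 ((text.toList.length : Int) - j) 1) [] := by
      rw [PySem.Str.toList_slice, PySem.Chars.slice_eq_listSlice,
          PySem.List.slice_toNat _ hi (by positivity), hsub, hrow]
      rw [show (i + ((pvCp (text.toList.drop i.toNat) (text.toList.drop j.toNat)).length : Int)).toNat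
            - i.toNat
          = (pvCp (text.toList.drop i.toNat) (text.toList.drop j.toNat)).length by omega]
      exact (pvCp_eq_take _ _).symm
    calc String.ofList (pvSubsA text.toList i j
            (PySem.List.pyRange 0 ((text.toList.length : Int) - j) 1) [])
        = String.ofList (PySem.Str.slice text (some i)
            (some (i + ((pvRowB text.toList i.toNat).getD j.toNat 0 : Int)))).toList := by
          rw [htl]
      _ = _ := String.ofList_toList
  · rw [PySem.Str.len_eq]
    simp only [String.toList_ofList]
    rw [hsub, hrow]

theorem pvContains_iff (l : PySem.Set String) (x : String) :
    PySem.Set.contains l x = true ↔ x ∈ l := by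
  simp [PySem.Set.contains]

-- the inner loop over j: A's list accumulator and B's (list, set) state stay in step,
-- under the invariant that the set contains exactly the strings of the list
theorem pvInner_eq (text : String) (i : Int) (hi : 0 ≤ i) :
    ∀ (js : List Int), (∀ j ∈ js, i < j) →
    ∀ (ngrams : List String) (seen : PySem.Set String),
    (∀ s : String, PySem.Set.contains seen s = true ↔ s ∈ ngrams) →
    (js.foldl (fun ngrams j =>
        let subs := String.ofList (pvSubsA text.toList i j
          (PySem.List.pyRange 0 ((text.toList.length : Int) - j) 1) [])
        if 3 ≤ PySem.Str.len subs ∧ subs ∉ ngrams then ngrams ++ [subs] else ngrams) ngrams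
      = (js.foldl (fun st j =>
          let L : Nat := (pvRowB text.toList i.toNat).getD j.toNat 0
          if 3 ≤ L then
            let s := PySem.Str.slice text (some i) (some (i + (L : Int)))
            if PySem.Set.contains st.2 s then st else (st.1 ++ [s], PySem.Set.add st.2 s)
          else st) (ngrams, seen)).1)
    ∧ (∀ s : String, PySem.Set.contains (js.foldl (fun st j =>
          let L : Nat := (pvRowB text.toList i.toNat).getD j.toNat 0
          if 3 ≤ L then
            let s := PySem.Str.slice text (some i) (some (i + (L : Int)))
            if PySem.Set.contains st.2 s then st else (st.1 ++ [s], PySem.Set.add st.2 s)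
          else st) (ngrams, seen)).2 s = true
        ↔ s ∈ (js.foldl (fun st j =>
          let L : Nat := (pvRowB text.toList i.toNat).getD j.toNat 0
          if 3 ≤ L then
            let s := PySem.Str.slice text (some i) (some (i + (L : Int)))
            if PySem.Set.contains st.2 s then st else (st.1 ++ [s], PySem.Set.add st.2 s)
          else st) (ngrams, seen)).1) := by
  intro js
  induction js with
  | nil => intro _ ngrams seen hinv; exact ⟨rfl, hinv⟩
  | cons j js ih =>
    intro hjs ngrams seen hinv
    have hij : i < j := hjs j (List.mem_cons_self ..)
    obtain ⟨hs, hlen⟩ := pvStep_eq text i j hi hij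
    simp only [List.foldl_cons]
    set L : Nat := (pvRowB text.toList i.toNat).getD j.toNat 0 with hL
    set s : String := PySem.Str.slice text (some i) (some (i + (L : Int))) with hsdef
    rw [hs] at hlen
    rw [hs]
    by_cases h3 : 3 ≤ L
    · by_cases hmem : s ∈ ngrams
      · -- already collected: both sides leave the state unchanged
        rw [if_neg (fun hc => hc.2 hmem), if_pos h3, if_pos ((hinv s).mpr hmem)]
        exact ih (fun j hj => hjs j (List.mem_cons_of_mem _ hj)) ngrams seen hinv
      · -- a new ngram: A appends, B appends and records it in the set
        rw [if_pos ⟨by rw [hlen]; exact_mod_cast h3, hmem⟩,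
            if_pos h3, if_neg (fun hc => hmem ((hinv s).mp hc))]
        refine ih (fun j hj => hjs j (List.mem_cons_of_mem _ hj)) (ngrams ++ [s])
          (PySem.Set.add seen s) ?_
        intro t
        rw [pvContains_iff, PySem.Set.mem_add, List.mem_append, List.mem_singleton]
        exact or_congr ((pvContains_iff seen t).symm.trans (hinv t)) Iff.rfl
    · -- too short: both sides skip
      rw [if_neg (fun hc => h3 (by
            have := hc.1
            rw [hlen] at this
            exact_mod_cast this)),
          if_neg h3]
      exact ih (fun j hj => hjs j (List.mem_cons_of_mem _ hj)) ngrams seen hinv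

-- the outer loop over i
theorem pvOuter_eq (text : String) :
    ∀ (is : List Int), (∀ i ∈ is, 0 ≤ i) →
    ∀ (ngrams : List String) (seen : PySem.Set String),
    (∀ s : String, PySem.Set.contains seen s = true ↔ s ∈ ngrams) →
    (is.foldl (fun ngrams i =>
        (PySem.List.pyRange (i + 3) ((text.toList.length : Int) - 3) 1).foldl (fun ngrams j =>
          let subs := String.ofList (pvSubsA text.toList i j
            (PySem.List.pyRange 0 ((text.toList.length : Int) - j) 1) [])
          if 3 ≤ PySem.Str.len subs ∧ subs ∉ ngrams then ngrams ++ [subs] else ngrams)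
          ngrams) ngrams
      = (is.foldl (fun (st : List String × PySem.Set String) i =>
          (PySem.List.pyRange (i + 3) ((text.toList.length : Int) - 3) 1).foldl (fun st j =>
            let L : Nat := (pvRowB text.toList i.toNat).getD j.toNat 0
            if 3 ≤ L then
              let s := PySem.Str.slice text (some i) (some (i + (L : Int)))
              if PySem.Set.contains st.2 s then st else (st.1 ++ [s], PySem.Set.add st.2 s)
            else st) st) (ngrams, seen)).1)
    ∧ (∀ s : String, PySem.Set.contains (is.foldl (fun (st : List String × PySem.Set String) i =>
          (PySem.List.pyRange (i + 3) ((text.toList.length : Int) - 3) 1).foldl (fun st j =>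
            let L : Nat := (pvRowB text.toList i.toNat).getD j.toNat 0
            if 3 ≤ L then
              let s := PySem.Str.slice text (some i) (some (i + (L : Int)))
              if PySem.Set.contains st.2 s then st else (st.1 ++ [s], PySem.Set.add st.2 s)
            else st) st) (ngrams, seen)).2 s = true
        ↔ s ∈ (is.foldl (fun (st : List String × PySem.Set String) i =>
          (PySem.List.pyRange (i + 3) ((text.toList.length : Int) - 3) 1).foldl (fun st j =>
            let L : Nat := (pvRowB text.toList i.toNat).getD j.toNat 0
            if 3 ≤ L then
              let s := PySem.Str.slice text (some i) (some (i + (L : Int)))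
              if PySem.Set.contains st.2 s then st else (st.1 ++ [s], PySem.Set.add st.2 s)
            else st) st) (ngrams, seen)).1) := by
  intro is
  induction is with
  | nil => intro _ ngrams seen hinv; exact ⟨rfl, hinv⟩
  | cons i is ih =>
    intro his ngrams seen hinv
    have hi : 0 ≤ i := his i (List.mem_cons_self ..)
    simp only [List.foldl_cons]
    obtain ⟨h1, h2⟩ := pvInner_eq text i hi
      (PySem.List.pyRange (i + 3) ((text.toList.length : Int) - 3) 1)
      (fun j hj => by have := (PySem.List.mem_pyRange_one.mp hj).1; omega)
      ngrams seen hinv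
    rw [h1]
    exact ih (fun i hi' => his i (List.mem_cons_of_mem _ hi')) _ _ h2

theorem find_ngrams_spec' (text : String) : find_ngrams text = find_ngrams_alt text := by
  unfold find_ngrams find_ngrams_alt
  exact (pvOuter_eq text (PySem.List.pyRange 0 ((text.toList.length : Int) - 3) 1)
    (fun i hi => (PySem.List.mem_pyRange_one.mp hi).1) [] PySem.Set.empty
    (by intro s; simp [PySem.Set.contains, PySem.Set.empty])).1

-- ===== VERDICT (by name: the statement is the Claim_ definition above) =====
theorem find_ngrams_spec : Claim_equal_find_ngrams := by
  intro text _
  unfold Spec_find_ngrams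
  exact find_ngrams_spec' text
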